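-- pv_equiv track=rewrite | github.com/rihts-4/Project_Prototype | SourceCode/friend.py | convert_interest_tags_to_vector
-- ===== SOURCE A (Python) =====
-- def convert_interest_tags_to_vector(interest_tags):
--     """Convert interest tags to feature vector"""
--     tag_to_index = {
--         'Beach': 12, 'Adventure': 13, 'Nature': 14, 'Culture': 15,
--         'Nightlife': 16, 'History': 17, 'Shopping': 18, 'Cuisine': 19
--     }
--
--     vector = [0] * 29
--     for tag in interest_tags:
--         if tag in tag_to_index:
--             vector[tag_to_index[tag]] = 1
--
--     return vector
-- ===== SOURCE B (Python) =====
-- def convert_interest_tags_to_vector(interest_tags):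
--     """Convert interest tags to feature vector"""
--     idx_to_tag = {
--         12: 'Beach', 13: 'Adventure', 14: 'Nature', 15: 'Culture',
--         16: 'Nightlife', 17: 'History', 18: 'Shopping', 19: 'Cuisine'
--     }
--     tags = set(interest_tags)
--     return [1 if idx_to_tag.get(i) in tags else 0 for i in range(29)]
-- ===== Notes on version B (the rewrite author's own statement) =====
-- stated objective: idiomatic
-- what changed: B builds the reverse map index->tag and a set of the input tags, then constructs the vector position-by-position with a comprehension over range(29), instead of A's mutating a preallocated list while iterating over the input tags.
import Mathlib
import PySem

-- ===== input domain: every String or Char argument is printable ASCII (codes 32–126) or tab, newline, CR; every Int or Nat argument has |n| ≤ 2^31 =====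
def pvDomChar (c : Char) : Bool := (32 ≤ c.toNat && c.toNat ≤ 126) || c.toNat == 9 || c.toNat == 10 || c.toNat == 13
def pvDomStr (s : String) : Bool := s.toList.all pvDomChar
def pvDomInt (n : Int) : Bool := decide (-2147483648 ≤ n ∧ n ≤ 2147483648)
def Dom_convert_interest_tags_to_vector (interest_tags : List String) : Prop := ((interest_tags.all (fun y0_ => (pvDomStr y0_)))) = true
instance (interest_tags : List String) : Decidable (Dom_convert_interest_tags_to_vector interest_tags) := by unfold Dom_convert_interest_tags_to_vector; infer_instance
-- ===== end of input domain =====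

-- B replaces A's input-driven in-place marking of a preallocated list by an
-- output-position-driven comprehension over a reverse map and a set of the tags (objective: idiomatic).

-- ===== PORT A =====
-- the dict tag_to_index, as membership-test + lookup in one: some idx iff the tag is a key
def pvTagToIndex? (tag : String) : Option Nat :=
  if tag = "Beach" then some 12
  else if tag = "Adventure" then some 13
  else if tag = "Nature" then some 14
  else if tag = "Culture" then some 15
  else if tag = "Nightlife" then some 16
  else if tag = "History" then some 17
  else if tag = "Shopping" then some 18
  else if tag = "Cuisine" then some 19
  else none

-- one iteration of A's for-loop: 'if tag in tag_to_index: vector[tag_to_index[tag]] = 1'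
-- (List.set is exact here: the dict's values 12..19 are all < 29 = len(vector))
def pvStep (v : List Int) (tag : String) : List Int :=
  match pvTagToIndex? tag with
  | some i => v.set i 1
  | none => v

def convert_interest_tags_to_vector (interest_tags : List String) : List Int :=
  interest_tags.foldl pvStep (List.replicate 29 0)

-- ===== PORT B =====
-- the dict idx_to_tag with .get: some tag iff i is a key (none plays Python's None, never in a set of strings)
def pvIdxToTag? (i : Int) : Option String :=
  if i = 12 then some "Beach"
  else if i = 13 then some "Adventure"
  else if i = 14 then some "Nature"
  else if i = 15 then some "Culture"
  else if i = 16 then some "Nightlife"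
  else if i = 17 then some "History"
  else if i = 18 then some "Shopping"
  else if i = 19 then some "Cuisine"
  else none

def convert_interest_tags_to_vector_alt (interest_tags : List String) : List Int :=
  let tags := PySem.Set.ofList interest_tags
  (PySem.List.pyRange 0 29 1).map (fun i =>
    match pvIdxToTag? i with
    | some t => if t ∈ tags then (1 : Int) else 0
    | none => 0)

-- ===== PRECONDITION & SPEC =====
def Spec_convert_interest_tags_to_vector (interest_tags : List String) (out : List Int) : Prop := out = convert_interest_tags_to_vector_alt interest_tags
instance (interest_tags : List String) (out : List Int) : Decidable (Spec_convert_interest_tags_to_vector interest_tags out) := by unfold Spec_convert_interest_tags_to_vector; infer_instance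

-- ===== CLAIM (what is proved, stated in full; the proofs are below) =====
def Claim_equal_convert_interest_tags_to_vector : Prop := ∀ (interest_tags : List String), Dom_convert_interest_tags_to_vector interest_tags → Spec_convert_interest_tags_to_vector interest_tags (convert_interest_tags_to_vector interest_tags)

-- ===== LEMMAS AND PROOFS =====

lemma pvStep_length (v : List Int) (t : String) : (pvStep v t).length = v.length := by
  unfold pvStep; cases pvTagToIndex? t <;> simp

-- the two lookup tables are inverse to each other
set_option maxHeartbeats 1600000 in
lemma pv_bridge (t : String) (i : Nat) :
    pvTagToIndex? t = some i ↔ pvIdxToTag? (i : Int) = some t := by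
  unfold pvTagToIndex? pvIdxToTag?
  split_ifs <;> simp_all [eq_comm] <;> omega

-- characterisation of A's fold, entry by entry
lemma pv_foldl_getElem? (ts : List String) (v : List Int) (i : Nat) (hi : i < v.length) :
    (ts.foldl pvStep v)[i]? =
      if ∃ t ∈ ts, pvTagToIndex? t = some i then some 1 else v[i]? := by
  induction ts generalizing v with
  | nil => simp
  | cons t ts ih =>
    simp only [List.foldl_cons]
    have hlen : (pvStep v t).length = v.length := pvStep_length v t
    rw [ih _ (by omega : i < (pvStep v t).length)]
    by_cases hmem : ∃ u ∈ ts, pvTagToIndex? u = some i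
    · simp [hmem]
    · simp only [List.exists_mem_cons_iff, hmem, or_false]
      unfold pvStep
      cases h : pvTagToIndex? t with
      | none => simp
      | some j =>
        rw [List.getElem?_set]
        by_cases hij : j = i
        · subst hij; simp [hi]
        · simp [hij]

lemma pv_foldl_length (ts : List String) (v : List Int) :
    (ts.foldl pvStep v).length = v.length := by
  induction ts generalizing v with
  | nil => rfl
  | cons t ts ih => simp [List.foldl_cons, ih, pvStep_length]

-- ===== VERDICT (by name: the statement is the Claim_ definition above) =====
theorem convert_interest_tags_to_vector_spec : Claim_equal_convert_interest_tags_to_vector := by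
  intro tags _
  unfold Spec_convert_interest_tags_to_vector
  unfold convert_interest_tags_to_vector convert_interest_tags_to_vector_alt
  apply List.ext_getElem?
  intro i
  by_cases hi : i < 29
  · have h29 : (29 : Int) = ((29 : Nat) : Int) := by norm_num
    rw [h29, PySem.List.getElem?_map_pyRange_zero _ 29 i (by exact_mod_cast hi)]
    rw [pv_foldl_getElem? tags _ i (by simp [hi])]
    cases h : pvIdxToTag? (i : Int) with
    | none =>
      have hno : ¬ ∃ t ∈ tags, pvTagToIndex? t = some i := by
        rintro ⟨t, _, ht⟩
        rw [pv_bridge] at ht; simp [h] at ht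
      simp [hno, hi]
      interval_cases i <;> rfl
    | some t₀ =>
      by_cases hm : t₀ ∈ tags
      · have hyes : ∃ t ∈ tags, pvTagToIndex? t = some i :=
          ⟨t₀, hm, (pv_bridge t₀ i).mpr h⟩
        simp [hyes, PySem.Set.mem_ofList, hm]
      · have hno : ¬ ∃ t ∈ tags, pvTagToIndex? t = some i := by
          rintro ⟨t, htm, ht⟩
          rw [pv_bridge, h] at ht
          obtain rfl := Option.some.inj ht
          exact hm htm
        simp [hno, hi, PySem.Set.mem_ofList, hm]
        interval_cases i <;> rfl
  · have hA : (tags.foldl pvStep (List.replicate 29 0)).length ≤ i := by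
      rw [pv_foldl_length]; simp; omega
    rw [List.getElem?_eq_none hA, List.getElem?_eq_none]
    simp [PySem.List.length_pyRange_one]; omega
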